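-- pv_equiv track=rewrite | github.com/irisbur/Nucleus | compress_distances_vector.py | compress_distances_vector_to_bits
-- ===== SOURCE A (Python) =====
-- from math import log2
--
-- def pad(num, to_bits_num):
--     if len(num) < to_bits_num:
--         return "0" * (to_bits_num - len(num)) + num
--     return num
--
-- def pad_from_right(num, to_bits_num):
--     if len(num) < to_bits_num:
--         return num + "0" * (to_bits_num - len(num))
--     return num
--
-- def dem_to_bin(ip_val):
--     if ip_val >= 1:
--         return dem_to_bin(ip_val // 2) + str(ip_val % 2)
--     return ''
--
-- def compress_distances_vector_to_bits(dis_vec):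
--     bits_string = ""
--     length = dem_to_bin(len(dis_vec))
--     length = pad(length, 16)
--     jumps = []
--     max_dis = 2
--     for i in range(len(dis_vec)):
--         while dis_vec[i] >= max_dis:
--             jumps.append(i)
--             max_dis = 2 * max_dis if max_dis else 1
--         dis = dem_to_bin(dis_vec[i])
--         dis = pad(dis, int(log2(max_dis)))
--         bits_string += dis
--     jumps_in_16bits = "".join([pad(dem_to_bin(x), 16) for x in jumps])
--     jumps_in_16bits = pad_from_right(jumps_in_16bits, 256)
--     return length + jumps_in_16bits + bits_string
-- ===== SOURCE B (Python) =====
-- def compress_distances_vector_to_bits(dis_vec):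
--     def to_bin(v):
--         # '' for v < 1, like the original encoding helper
--         if v < 1:
--             return ''
--         s = ''
--         while v:
--             s = str(v % 2) + s
--             v //= 2
--         return s
--
--     w = 1                      # current bit-width = log2(max_dis)
--     jumps = []
--     parts = []
--     for i, v in enumerate(dis_vec):
--         nw = max(w, v.bit_length()) if v > 0 else w
--         jumps.extend([i] * (nw - w))
--         w = nw
--         parts.append(to_bin(v).rjust(w, '0'))
--     length = to_bin(len(dis_vec)).rjust(16, '0')
--     jumps_bits = "".join(to_bin(x).rjust(16, '0') for x in jumps).ljust(256, '0')
--     return length + jumps_bits + "".join(parts)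
-- ===== Notes on version B (the rewrite author's own statement) =====
-- stated objective: alternative
-- what changed: Replaces A's per-element doubling while-loop over max_dis (and float log2 for the pad width) by a single pass that tracks the bit-width directly via a closed-form update nw = max(w, v.bit_length()), emitting the jump index (nw - w) times, with an iterative binary helper instead of A's recursive dem_to_bin.
import Mathlib
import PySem

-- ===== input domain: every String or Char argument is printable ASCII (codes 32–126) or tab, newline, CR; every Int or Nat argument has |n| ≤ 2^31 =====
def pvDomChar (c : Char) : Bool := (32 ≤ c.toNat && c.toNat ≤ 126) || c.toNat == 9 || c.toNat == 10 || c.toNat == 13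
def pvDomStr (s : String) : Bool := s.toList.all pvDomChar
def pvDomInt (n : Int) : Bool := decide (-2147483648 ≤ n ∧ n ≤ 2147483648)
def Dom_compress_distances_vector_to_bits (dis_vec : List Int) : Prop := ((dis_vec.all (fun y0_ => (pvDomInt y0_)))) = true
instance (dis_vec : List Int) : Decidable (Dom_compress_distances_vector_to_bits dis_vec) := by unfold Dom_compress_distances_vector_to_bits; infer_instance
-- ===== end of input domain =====

-- B replaces A's per-element doubling while-loop by a closed-form bit-width update
-- (new width = max(width, v.bit_length())) with delta-driven jumps; return value only.

-- ===== PORT A =====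

-- pad(num, to_bits_num)
def pvPadA (num : List Char) (n : Nat) : List Char :=
  if num.length < n then List.replicate (n - num.length) '0' ++ num else num

-- pad_from_right(num, to_bits_num)
def pvPadRightA (num : List Char) (n : Nat) : List Char :=
  if num.length < n then num ++ List.replicate (n - num.length) '0' else num

-- dem_to_bin(ip_val), '' for values < 1; structural recursion on a fuel that only
-- bounds the recursion depth (v halves each step, so v.toNat + 1 never runs out)
def pvDemToBinF (fuel : Nat) (v : Int) : List Char :=
  match fuel with
  | 0 => []
  | fuel + 1 =>
    if 1 ≤ v then
      pvDemToBinF fuel (PySem.Int.floordiv v 2) ++ (PySem.Int.toStr (PySem.Int.mod v 2)).toList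
    else []

def pvDemToBin (v : Int) : List Char := pvDemToBinF (v.toNat + 1) v

-- the inner 'while dis_vec[i] >= max_dis' loop, with Python's
-- 'max_dis = 2 * max_dis if max_dis else 1'; fuel only bounds the iteration count
-- (max_dis starts at 2 and doubles past v within v.toNat + 2 steps)
def pvWhileAF (fuel : Nat) (v i : Int) (jumps : List Int) (max_dis : Int) : List Int × Int :=
  match fuel with
  | 0 => (jumps, max_dis)
  | fuel + 1 =>
    if v ≥ max_dis then
      pvWhileAF fuel v i (jumps ++ [i]) (if max_dis ≠ 0 then 2 * max_dis else 1)
    else (jumps, max_dis)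

def pvWhileA (v i : Int) (jumps : List Int) (max_dis : Int) : List Int × Int :=
  pvWhileAF (v.toNat + 2) v i jumps max_dis

-- the 'for i in range(len(dis_vec))' loop, accumulating jumps, max_dis and bits_string
def pvLoopA (l : List Int) (i : Int) (jumps : List Int) (max_dis : Int)
    (bits : List Char) : List Int × List Char :=
  match l with
  | [] => (jumps, bits)
  | v :: rest =>
    pvLoopA rest (i + 1) (pvWhileA v i jumps max_dis).1 (pvWhileA v i jumps max_dis).2
      -- int(log2(max_dis)): exact here since max_dis is always a power of two ≤ 2^33
      (bits ++ pvPadA (pvDemToBin v) (Nat.log2 (pvWhileA v i jumps max_dis).2.toNat))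

def compress_distances_vector_to_bits (dis_vec : List Int) : String :=
  let length := pvPadA (pvDemToBin (dis_vec.length : Int)) 16
  let st := pvLoopA dis_vec 0 [] 2 []
  let jumps16 := pvPadRightA ((st.1.map (fun x => pvPadA (pvDemToBin x) 16)).flatten) 256
  String.ofList (length ++ jumps16 ++ st.2)

-- ===== PORT B =====

-- to_bin's while loop, prepending bits; fuel only bounds the depth (v halves)
def pvToBinLoopF (fuel : Nat) (v : Int) (s : List Char) : List Char :=
  match fuel with
  | 0 => s
  | fuel + 1 =>
    if v ≠ 0 then
      pvToBinLoopF fuel (PySem.Int.floordiv v 2) ((PySem.Int.toStr (PySem.Int.mod v 2)).toList ++ s)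
    else s

-- to_bin(v): '' for v < 1
def pvToBin (v : Int) : List Char :=
  if v < 1 then [] else pvToBinLoopF (v.toNat + 1) v []

-- s.rjust(n, '0') / s.ljust(n, '0')
def pvRjust (s : List Char) (n : Nat) : List Char := List.replicate (n - s.length) '0' ++ s
def pvLjust (s : List Char) (n : Nat) : List Char := s ++ List.replicate (n - s.length) '0'

-- B's single pass: closed-form width update, delta-driven jumps, parts list
def pvLoopB (l : List Int) (i : Int) (w : Nat) (jumps : List Int)
    (parts : List (List Char)) : List Int × Nat × List (List Char) :=
  match l with
  | [] => (jumps, w, parts)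
  | v :: rest =>
    let nw := if 0 < v then max w (PySem.Int.bitLength v) else w
    pvLoopB rest (i + 1) nw (jumps ++ List.replicate (nw - w) i)
      (parts ++ [pvRjust (pvToBin v) nw])

def compress_distances_vector_to_bits_alt (dis_vec : List Int) : String :=
  let st := pvLoopB dis_vec 0 1 [] []
  let length := pvRjust (pvToBin (dis_vec.length : Int)) 16
  let jumps_bits := pvLjust ((st.1.map (fun x => pvRjust (pvToBin x) 16)).flatten) 256
  String.ofList (length ++ jumps_bits ++ st.2.2.flatten)

-- ===== PRECONDITION & SPEC =====
def Spec_compress_distances_vector_to_bits (dis_vec : List Int) (out : String) : Prop := out = compress_distances_vector_to_bits_alt dis_vec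
instance (dis_vec : List Int) (out : String) : Decidable (Spec_compress_distances_vector_to_bits dis_vec out) := by unfold Spec_compress_distances_vector_to_bits; infer_instance

-- ===== CLAIM (what is proved, stated in full; the proofs are below) =====
def Claim_equal_compress_distances_vector_to_bits : Prop := ∀ (dis_vec : List Int), Dom_compress_distances_vector_to_bits dis_vec → Spec_compress_distances_vector_to_bits dis_vec (compress_distances_vector_to_bits dis_vec)

-- ===== LEMMAS AND PROOFS =====

-- pad = rjust, pad_from_right = ljust
theorem padA_eq_rjust (s : List Char) (n : Nat) : pvPadA s n = pvRjust s n := by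
  unfold pvPadA pvRjust
  split <;> simp_all

theorem padRightA_eq_ljust (s : List Char) (n : Nat) : pvPadRightA s n = pvLjust s n := by
  unfold pvPadRightA pvLjust
  split <;> simp_all

theorem half_toNat_lt (v : Int) (hv : 1 ≤ v) :
    (PySem.Int.floordiv v 2).toNat < v.toNat := by
  have := PySem.Int.floordiv_eq_ediv_of_pos (a := v) (b := 2) (by omega)
  omega

-- dem_to_bin's result does not depend on the fuel once it is large enough
theorem demF_congr (f1 : Nat) : ∀ (f2 : Nat) (v : Int), v.toNat < f1 → v.toNat < f2 →
    pvDemToBinF f1 v = pvDemToBinF f2 v := by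
  induction f1 with
  | zero => intro f2 v h1 _; omega
  | succ f1 ih =>
    intro f2 v h1 h2
    match f2 with
    | 0 => omega
    | f2 + 1 =>
      rw [pvDemToBinF, pvDemToBinF]
      by_cases hv : (1 : Int) ≤ v
      · have hlt := half_toNat_lt v hv
        rw [if_pos hv, if_pos hv, ih f2 (PySem.Int.floordiv v 2) (by omega) (by omega)]
      · rw [if_neg hv, if_neg hv]

theorem dem_unfold (v : Int) (hv : 1 ≤ v) :
    pvDemToBin v = pvDemToBin (PySem.Int.floordiv v 2) ++ (PySem.Int.toStr (PySem.Int.mod v 2)).toList := by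
  have hlt := half_toNat_lt v hv
  unfold pvDemToBin
  rw [pvDemToBinF, if_pos hv, demF_congr v.toNat ((PySem.Int.floordiv v 2).toNat + 1)
    (PySem.Int.floordiv v 2) (by omega) (by omega)]

theorem dem_neg (v : Int) (hv : ¬ (1 : Int) ≤ v) : pvDemToBin v = [] := by
  unfold pvDemToBin
  rw [pvDemToBinF, if_neg hv]

-- B's iterative to_bin computes A's recursive dem_to_bin
theorem toBinLoopF_eq (fuel : Nat) : ∀ (v : Int) (s : List Char), 0 ≤ v → v.toNat < fuel →
    pvToBinLoopF fuel v s = pvDemToBin v ++ s := by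
  induction fuel with
  | zero => intro v s _ h; omega
  | succ fuel ih =>
    intro v s h0 hf
    rw [pvToBinLoopF]
    by_cases hv : v ≠ 0
    · have hv1 : (1 : Int) ≤ v := by omega
      have hlt := half_toNat_lt v hv1
      rw [if_pos hv, ih (PySem.Int.floordiv v 2) _ (by
          have := PySem.Int.floordiv_eq_ediv_of_pos (a := v) (b := 2) (by omega); omega)
        (by omega), dem_unfold v hv1, List.append_assoc]
    · rw [if_neg hv, dem_neg v (by omega)]
      simp

theorem toBin_eq (v : Int) : pvToBin v = pvDemToBin v := by
  unfold pvToBin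
  split
  · rw [dem_neg v (by omega)]
  · rw [toBinLoopF_eq (v.toNat + 1) v [] (by omega) (by omega)]
    simp

-- bit-length bracket: for v > 0, v ≥ 2^w ↔ bitLength v > w
theorem ge_pow_iff_bitLength (v : Int) (hv : 0 < v) (w : Nat) :
    ((2 : Int) ^ w ≤ v ↔ w < PySem.Int.bitLength v) := by
  constructor
  · intro hle
    by_contra hlt
    have h1 := PySem.Int.lt_two_pow_bitLength v
    have h2 : v.natAbs < 2 ^ w :=
      lt_of_lt_of_le h1 (Nat.pow_le_pow_right (by omega) (by omega))
    have h3 : ((2 : Int) ^ w) ≤ (v.natAbs : Int) := by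
      rwa [Int.natAbs_of_nonneg (le_of_lt hv)]
    have : (2 : Int) ^ w < 2 ^ w := lt_of_le_of_lt h3 (by exact_mod_cast h2)
    omega
  · intro hlt
    have h2 := PySem.Int.two_pow_bitLength_le v (by omega)
    have h3 : 2 ^ w ≤ v.natAbs :=
      le_trans (Nat.pow_le_pow_right (by omega) (by omega)) h2
    calc (2 : Int) ^ w = ((2 ^ w : Nat) : Int) := by push_cast; ring
      _ ≤ (v.natAbs : Int) := by exact_mod_cast h3
      _ = v := Int.natAbs_of_nonneg (le_of_lt hv)

theorem bitLength_le_toNat (v : Int) (hv : 0 < v) : PySem.Int.bitLength v ≤ v.toNat := by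
  have h2 := PySem.Int.two_pow_bitLength_le v (by omega)
  have h3 : PySem.Int.bitLength v - 1 < 2 ^ (PySem.Int.bitLength v - 1) :=
    Nat.lt_two_pow_self
  have h4 : v.natAbs = v.toNat := by omega
  omega

theorem log2_two_pow_int (w : Nat) : Nat.log2 ((2 : Int) ^ w).toNat = w := by
  have h : ((2 : Int) ^ w).toNat = 2 ^ w := by
    have : (2 : Int) ^ w = ((2 ^ w : Nat) : Int) := by push_cast; ring
    rw [this, Int.toNat_natCast]
  rw [h]
  simp [Nat.log2_eq_log_two, Nat.log_pow]

-- the doubling while-loop in closed form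
theorem whileAF_closed (v : Int) : ∀ (fuel : Nat) (w : Nat) (i : Int) (jumps : List Int)
    (hw : 1 ≤ w) (hn : 0 < v → PySem.Int.bitLength v ≤ w + fuel),
    pvWhileAF fuel v i jumps ((2 : Int) ^ w) =
      (jumps ++ List.replicate ((if 0 < v then max w (PySem.Int.bitLength v) else w) - w) i,
       (2 : Int) ^ (if 0 < v then max w (PySem.Int.bitLength v) else w)) := by
  intro fuel
  induction fuel with
  | zero =>
    intro w i jumps _hw hn
    rw [pvWhileAF]
    by_cases hv : 0 < v
    · have hble : PySem.Int.bitLength v ≤ w := by have := hn hv; omega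
      simp [hv, Nat.max_eq_left hble]
    · simp [hv]
  | succ fuel ih =>
    intro w i jumps hw hn
    rw [pvWhileAF]
    have hm : (0 : Int) < 2 ^ w := by positivity
    by_cases hge : v ≥ (2 : Int) ^ w
    · rw [if_pos hge]
      have hv : 0 < v := lt_of_lt_of_le hm hge
      have hbw : w < PySem.Int.bitLength v := (ge_pow_iff_bitLength v hv w).mp hge
      rw [if_pos (by omega), show (2 : Int) * 2 ^ w = 2 ^ (w + 1) from by ring,
        ih (w + 1) i (jumps ++ [i]) (by omega) (fun _ => by have := hn hv; omega)]
      have hmax : max (w + 1) (PySem.Int.bitLength v) = max w (PySem.Int.bitLength v) := by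
        omega
      simp only [hv, if_pos, hmax]
      rw [Prod.mk.injEq]
      refine ⟨?_, rfl⟩
      rw [List.append_assoc]
      congr 1
      rw [Nat.max_eq_right (show w ≤ PySem.Int.bitLength v by omega),
          show PySem.Int.bitLength v - w = (PySem.Int.bitLength v - (w + 1)) + 1 by omega,
          List.replicate_succ]
      rfl
    · rw [if_neg hge]
      by_cases hv : 0 < v
      · have hble : PySem.Int.bitLength v ≤ w := by
          by_contra hb
          exact hge ((ge_pow_iff_bitLength v hv w).mpr (by omega))
        simp [hv, Nat.max_eq_left hble]
      · simp [hv]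

theorem whileA_closed (v i : Int) (jumps : List Int) (w : Nat) (hw : 1 ≤ w) :
    pvWhileA v i jumps ((2 : Int) ^ w) =
      (jumps ++ List.replicate ((if 0 < v then max w (PySem.Int.bitLength v) else w) - w) i,
       (2 : Int) ^ (if 0 < v then max w (PySem.Int.bitLength v) else w)) := by
  unfold pvWhileA
  exact whileAF_closed v (v.toNat + 2) w i jumps hw
    (fun hv => by have := bitLength_le_toNat v hv; omega)

-- the two main loops agree, relating max_dis = 2^w and bits = parts.flatten
theorem loopAB (l : List Int) : ∀ (i : Int) (jumps : List Int) (w : Nat)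
    (parts : List (List Char)) (hw : 1 ≤ w),
    pvLoopA l i jumps ((2 : Int) ^ w) parts.flatten =
      ((pvLoopB l i w jumps parts).1, (pvLoopB l i w jumps parts).2.2.flatten) := by
  induction l with
  | nil => intro i jumps w parts _hw; rfl
  | cons v rest ih =>
    intro i jumps w parts hw
    have hkey := whileA_closed v i jumps w hw
    set nw := if 0 < v then max w (PySem.Int.bitLength v) else w with hnw
    have hnw1 : 1 ≤ nw := by rw [hnw]; split <;> omega
    show pvLoopA (v :: rest) i jumps ((2 : Int) ^ w) parts.flatten = _
    rw [pvLoopA]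
    simp only [hkey]
    rw [log2_two_pow_int nw, padA_eq_rjust, ← toBin_eq]
    have hflat : parts.flatten ++ pvRjust (pvToBin v) nw =
        (parts ++ [pvRjust (pvToBin v) nw]).flatten := by simp
    rw [hflat, ih (i + 1) (jumps ++ List.replicate (nw - w) i) nw
        (parts ++ [pvRjust (pvToBin v) nw]) hnw1]
    rw [pvLoopB]

-- ===== VERDICT (by name: the statement is the Claim_ definition above) =====
theorem compress_distances_vector_to_bits_spec : Claim_equal_compress_distances_vector_to_bits := by
  intro dis_vec _
  unfold Spec_compress_distances_vector_to_bits
  unfold compress_distances_vector_to_bits compress_distances_vector_to_bits_alt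
  have h := loopAB dis_vec 0 [] 1 [] (le_refl 1)
  norm_num at h
  rw [h]
  simp only [padA_eq_rjust, padRightA_eq_ljust, ← toBin_eq]
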